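-- pv_equiv track=rewrite | github.com/robert/PySkyWiFi | src/PySkyWiFi/base26.py | b26_decode
-- ===== SOURCE A (Python) =====
-- def b26_decode(input_string):
--     # Convert base26 string to a base-256 integer
--     base26_int = 0
--     for char in input_string:
--         base26_int = base26_int * 26 + (ord(char) - 65)
--
--     # Convert base-256 integer to string
--     bytes_list = []
--     while base26_int > 0:
--         bytes_list.insert(0, base26_int % 256)
--         base26_int //= 256
--
--     return ''.join(chr(byte) for byte in bytes_list)
-- ===== SOURCE B (Python) =====
-- def b26_decode(input_string):
--     # Convert base26 string to a base-256 integer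
--     base26_int = 0
--     for char in input_string:
--         base26_int = base26_int * 26 + (ord(char) - 65)
--
--     # Extract the bytes in one shot instead of a digit-extraction loop
--     if base26_int <= 0:
--         return ''
--     length = (base26_int.bit_length() + 7) // 8
--     return ''.join(chr(b) for b in base26_int.to_bytes(length, 'big'))
-- ===== Notes on version B (the rewrite author's own statement) =====
-- stated objective: idiomatic
-- what changed: The front-insertion while-loop that extracts base-256 digits one by one with big-int division is replaced by a closed-form byte count ((bit_length()+7)//8) and a single big-endian to_bytes extraction.
import Mathlib
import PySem

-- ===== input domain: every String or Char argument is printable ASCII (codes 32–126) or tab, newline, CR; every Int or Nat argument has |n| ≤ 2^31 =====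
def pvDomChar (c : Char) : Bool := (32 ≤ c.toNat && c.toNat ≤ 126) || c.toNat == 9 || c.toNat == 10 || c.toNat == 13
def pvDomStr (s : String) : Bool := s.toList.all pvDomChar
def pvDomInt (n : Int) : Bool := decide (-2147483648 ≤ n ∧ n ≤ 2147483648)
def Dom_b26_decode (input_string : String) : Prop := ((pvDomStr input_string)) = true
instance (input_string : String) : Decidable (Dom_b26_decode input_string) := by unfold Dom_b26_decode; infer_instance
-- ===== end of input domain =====

-- B replaces A's front-insertion digit-extraction while-loop by the closed-form byte count
-- (bit_length + 7) // 8 plus a single big-endian to_bytes extraction (objective: idiomatic).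

-- ===== PORT A =====
-- A's while-loop: bytes_list.insert(0, n % 256); n //= 256  (front-insertion = cons onto acc)
def b26LoopA (n : Int) (acc : List Int) : List Int :=
  if h : 0 < n then
    b26LoopA (PySem.Int.floordiv n 256) (PySem.Int.mod n 256 :: acc)
  else acc
termination_by n.toNat
decreasing_by
  have h2 : PySem.Int.floordiv n 256 = ((n.toNat / 256 : Nat) : Int) := by
    have hc : ((n.toNat : Int)) = n := Int.toNat_of_nonneg h.le
    calc PySem.Int.floordiv n 256 = PySem.Int.floordiv ((n.toNat : Nat) : Int) ((256 : Nat) : Int) := by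
          rw [hc]; norm_num
      _ = ((n.toNat / 256 : Nat) : Int) := PySem.Int.floordiv_natCast _ _
  rw [h2, Int.toNat_natCast]
  have : 0 < n.toNat := by omega
  exact Nat.div_lt_self this (by norm_num)

def b26_decode (input_string : String) : String :=
  let base26_int := input_string.toList.foldl (fun a c => a * 26 + ((c.toNat : Int) - 65)) 0
  let bytes_list := b26LoopA base26_int []
  String.mk (bytes_list.map (fun b => Char.ofNat b.toNat))

-- ===== PORT B =====
-- hand port of int.to_bytes(len, 'big'): exact for 0 ≤ n < 256^len
def b26ToBytesBE : Nat → Nat → List Nat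
  | 0, _ => []
  | len + 1, n => b26ToBytesBE len (n / 256) ++ [n % 256]

def b26_decode_alt (input_string : String) : String :=
  let base26_int := input_string.toList.foldl (fun a c => a * 26 + ((c.toNat : Int) - 65)) 0
  if base26_int ≤ 0 then ""
  else
    let length := (PySem.Int.bitLength base26_int + 7) / 8
    String.mk ((b26ToBytesBE length base26_int.toNat).map Char.ofNat)

-- ===== PRECONDITION & SPEC =====
def Spec_b26_decode (input_string : String) (out : String) : Prop := out = b26_decode_alt input_string
instance (input_string : String) (out : String) : Decidable (Spec_b26_decode input_string out) := by unfold Spec_b26_decode; infer_instance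

-- ===== CLAIM (what is proved, stated in full; the proofs are below) =====
def Claim_equal_b26_decode : Prop := ∀ (input_string : String), Dom_b26_decode input_string → Spec_b26_decode input_string (b26_decode input_string)

-- ===== LEMMAS AND PROOFS =====

-- A's extraction loop equals the fixed-length big-endian byte list, for the exact byte count.
theorem b26LoopA_eq_toBytes (len : Nat) :
    ∀ (m : Nat) (acc : List Int), 0 < m → 256 ^ (len - 1) ≤ m → m < 256 ^ len →
    b26LoopA (m : Int) acc = (b26ToBytesBE len m).map Int.ofNat ++ acc := by
  induction len with
  | zero =>
    intro m acc hm hlo hhi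
    simp at hhi; omega
  | succ len ih =>
    intro m acc hm hlo hhi
    rw [b26LoopA]
    have hmpos : (0 : Int) < (m : Int) := by exact_mod_cast hm
    rw [dif_pos hmpos]
    have hfd : PySem.Int.floordiv (m : Int) 256 = ((m / 256 : Nat) : Int) := by
      exact_mod_cast PySem.Int.floordiv_natCast m 256
    have hmd : PySem.Int.mod (m : Int) 256 = ((m % 256 : Nat) : Int) := by
      exact_mod_cast PySem.Int.mod_natCast m 256
    rw [hfd, hmd]
    by_cases hq : m / 256 = 0
    · -- m < 256, so len must be 0
      have hm256 : m < 256 := by omega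
      have hlen0 : len = 0 := by
        by_contra h
        have : 256 ^ 1 ≤ 256 ^ len := Nat.pow_le_pow_right (by norm_num) (by omega)
        simp at hlo
        omega
      subst hlen0
      rw [hq]
      rw [b26LoopA]
      simp [b26ToBytesBE]
    · have hqpos : 0 < m / 256 := Nat.pos_of_ne_zero hq
      have hlo' : 256 ^ (len - 1) ≤ m / 256 := by
        rcases Nat.eq_zero_or_pos len with h | h
        · simpa [h] using Nat.one_le_iff_ne_zero.mpr hq
        · have : 256 ^ (len - 1) * 256 ≤ m := by
            have : 256 ^ (len - 1) * 256 = 256 ^ len := by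
              rw [← pow_succ]; congr 1; omega
            rw [this]; simpa using hlo
          exact (Nat.le_div_iff_mul_le (by norm_num)).mpr this
      have hhi' : m / 256 < 256 ^ len := by
        have : m < 256 ^ len * 256 := by
          have : 256 ^ len * 256 = 256 ^ (len + 1) := by rw [← pow_succ]
          omega
        exact Nat.div_lt_of_lt_mul (by omega)
      rw [ih (m / 256) ((↑(m % 256) : Int) :: acc) hqpos hlo' hhi']
      simp [b26ToBytesBE]

-- The byte count B computes brackets m as 256^(len-1) ≤ m < 256^len.
theorem b26_len_brackets (m : Nat) (hm : 0 < m) :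
    256 ^ (((PySem.Int.bitLength (m : Int) + 7) / 8) - 1) ≤ m ∧
    m < 256 ^ ((PySem.Int.bitLength (m : Int) + 7) / 8) := by
  set bl := PySem.Int.bitLength (m : Int) with hbl
  have hub : m < 2 ^ bl := by
    have := PySem.Int.lt_two_pow_bitLength (m : Int)
    simpa using this
  have hlb : 2 ^ (bl - 1) ≤ m := by
    have := PySem.Int.two_pow_bitLength_le (m : Int) (by exact_mod_cast hm.ne')
    simpa using this
  have hbl1 : 1 ≤ bl := by
    by_contra h
    have : bl = 0 := by omega
    rw [this] at hub; simp at hub; omega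
  set len := (bl + 7) / 8 with hlen
  have h256 : ∀ k : Nat, (256 : Nat) ^ k = 2 ^ (8 * k) := by
    intro k; rw [pow_mul]; norm_num
  constructor
  · rw [h256]
    calc 2 ^ (8 * (len - 1)) ≤ 2 ^ (bl - 1) :=
          Nat.pow_le_pow_right (by norm_num) (by omega)
      _ ≤ m := hlb
  · rw [h256]
    calc m < 2 ^ bl := hub
      _ ≤ 2 ^ (8 * len) := Nat.pow_le_pow_right (by norm_num) (by omega)

-- the whole body of both ports, stated over the shared accumulated integer n
theorem b26_decode_body_eq (n : Int) :
    String.mk ((b26LoopA n []).map (fun b => Char.ofNat b.toNat)) =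
    (if n ≤ 0 then "" else
      String.mk ((b26ToBytesBE ((PySem.Int.bitLength n + 7) / 8) n.toNat).map Char.ofNat)) := by
  by_cases h : n ≤ 0
  · rw [if_pos h, b26LoopA, dif_neg (by omega)]
    rfl
  · rw [if_neg h]
    have hpos : 0 < n := by omega
    have hcast : ((n.toNat : Int)) = n := Int.toNat_of_nonneg hpos.le
    have hmpos : 0 < n.toNat := by omega
    obtain ⟨hlo, hhi⟩ := b26_len_brackets n.toNat hmpos
    rw [hcast] at hlo hhi
    have key := b26LoopA_eq_toBytes ((PySem.Int.bitLength n + 7) / 8) n.toNat []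
      hmpos hlo hhi
    rw [hcast] at key
    rw [key]
    congr 1
    rw [List.append_nil, List.map_map]
    apply List.map_congr_left
    intro b _
    simp

-- ===== VERDICT (by name: the statement is the Claim_ definition above) =====
theorem b26_decode_spec : Claim_equal_b26_decode := by
  intro s _
  exact b26_decode_body_eq (s.toList.foldl (fun a c => a * 26 + ((c.toNat : Int) - 65)) 0)
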